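-- pv_equiv track=rewrite | github.com/Vivekscodes/Git-Agent | agent.py | is_important_file
-- ===== SOURCE A (Python) =====
-- def is_important_file(file_path):
--     """
--     Check if the file is important based on its path.
--     """
--     path_lower = file_path.lower()
--     skip_patterns = [
--         '/test/', 'test_', '_test',
--         '/tests/',
--         '.config.', 'config.',
--         '.gitignore',
--         'readme', '.md',
--         '.env', '.env.',
--         'setup.py',
--         '/docs/', '/examples/',
--         '/node_modules/',
--         '/venv/', '/env/',
--         '.min.js', '.min.css'
--     ]
--     for pattern in skip_patterns:
--         if pattern in path_lower:
--             return False
--     return True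
-- ===== SOURCE B (Python) =====
-- def is_important_file(file_path):
--     """
--     Check if the file is important based on its path.
--     """
--     path = file_path.lower()
--     patterns = [
--         '/test/', 'test_', '_test',
--         '/tests/',
--         '.config.', 'config.',
--         '.gitignore',
--         'readme', '.md',
--         '.env', '.env.',
--         'setup.py',
--         '/docs/', '/examples/',
--         '/node_modules/',
--         '/venv/', '/env/',
--         '.min.js', '.min.css'
--     ]
--     # single left-to-right pass: at each position, does some pattern start here?
--     for i in range(len(path)):
--         if any(path.startswith(p, i) for p in patterns):
--             return False
--     return True
-- ===== Notes on version B (the rewrite author's own statement) =====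
-- stated objective: alternative
-- what changed: Replaced the pattern-outer loop of repeated full substring-containment scans by a single position-outer left-to-right pass over the lowered path that at each index checks whether any skip pattern starts there.
import Mathlib
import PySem

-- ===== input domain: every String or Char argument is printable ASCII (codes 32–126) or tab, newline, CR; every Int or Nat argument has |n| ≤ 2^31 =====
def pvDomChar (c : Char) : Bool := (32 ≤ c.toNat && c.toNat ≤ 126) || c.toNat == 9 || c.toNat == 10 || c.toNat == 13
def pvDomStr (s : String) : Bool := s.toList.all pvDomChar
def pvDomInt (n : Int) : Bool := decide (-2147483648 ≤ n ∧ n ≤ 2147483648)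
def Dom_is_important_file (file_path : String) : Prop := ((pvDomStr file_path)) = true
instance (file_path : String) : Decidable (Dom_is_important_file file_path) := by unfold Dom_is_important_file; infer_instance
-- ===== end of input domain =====

-- B replaces A's pattern-outer repeated substring scans by one position-outer pass over the path (objective: alternative).

-- ===== PORT A =====
def pvSkipPatterns : List String :=
  ["/test/", "test_", "_test",
   "/tests/",
   ".config.", "config.",
   ".gitignore",
   "readme", ".md",
   ".env", ".env.",
   "setup.py",
   "/docs/", "/examples/",
   "/node_modules/",
   "/venv/", "/env/",
   ".min.js", ".min.css"]

-- the 'for pattern in skip_patterns: if pattern in path_lower: return False' loop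
def pvALoop (path_lower : String) : List String → Bool
  | [] => true
  | p :: rest => if PySem.Str.isIn p path_lower then false else pvALoop path_lower rest

def is_important_file (file_path : String) : Bool :=
  pvALoop (PySem.Str.lower file_path) pvSkipPatterns

-- ===== PORT B =====
def pvSkipPatternsB : List (List Char) := pvSkipPatterns.map String.toList

-- B's single pass: at each position i (= each suffix), does some pattern start here?
def pvBScan (ps : List (List Char)) : List Char → Bool
  | [] => true
  | c :: rest => if ps.any (fun p => p.isPrefixOf (c :: rest)) then false else pvBScan ps rest

def is_important_file_alt (file_path : String) : Bool :=
  pvBScan pvSkipPatternsB (PySem.Chars.lower file_path.toList)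

-- ===== PRECONDITION & SPEC =====
def Spec_is_important_file (file_path : String) (out : Bool) : Prop := out = is_important_file_alt file_path
instance (file_path : String) (out : Bool) : Decidable (Spec_is_important_file file_path out) := by unfold Spec_is_important_file; infer_instance

-- ===== CLAIM (what is proved, stated in full; the proofs are below) =====
def Claim_equal_is_important_file : Prop := ∀ (file_path : String), Dom_is_important_file file_path → Spec_is_important_file file_path (is_important_file file_path)

-- ===== LEMMAS AND PROOFS =====

-- A's loop returns true iff no pattern is an infix of the lowered path
theorem pvALoop_eq_true_iff (pl : String) (ps : List String) :
    pvALoop pl ps = true ↔ ∀ p ∈ ps, ¬ p.toList <:+: pl.toList := by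
  induction ps with
  | nil => simp [pvALoop]
  | cons p rest ih =>
      simp only [pvALoop]
      by_cases h : PySem.Str.isIn p pl = true
      · rw [if_pos h]
        simp only [Bool.false_eq_true, false_iff]
        intro hall
        exact hall p (List.mem_cons_self) ((PySem.Str.isIn_iff_infix p pl).mp h)
      · rw [if_neg h, ih]
        have hni : ¬ p.toList <:+: pl.toList :=
          fun hc => h ((PySem.Str.isIn_iff_infix p pl).mpr hc)
        simp [hni]

-- B's scan returns true iff no (nonempty) pattern is a prefix of any suffix
theorem pvBScan_eq_true_iff (ps : List (List Char)) (hne : ∀ p ∈ ps, p ≠ []) (s : List Char) :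
    pvBScan ps s = true ↔ ∀ p ∈ ps, ¬ ∃ j, p <+: s.drop j := by
  induction s with
  | nil =>
      simp only [pvBScan, true_iff]
      rintro p hp ⟨j, hj⟩
      simp only [List.drop_nil] at hj
      exact hne p hp (List.prefix_nil.mp hj)
  | cons c rest ih =>
      simp only [pvBScan]
      by_cases h : ps.any (fun p => p.isPrefixOf (c :: rest)) = true
      · obtain ⟨p, hp, hpre⟩ := List.any_eq_true.mp h
        rw [if_pos h]
        simp only [Bool.false_eq_true, false_iff]
        intro hall
        exact hall p hp ⟨0, by simpa using List.isPrefixOf_iff_prefix.mp hpre⟩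
      · rw [if_neg h, ih]
        constructor
        · rintro hall p hp ⟨j, hj⟩
          cases j with
          | zero =>
              exact h (List.any_eq_true.mpr
                ⟨p, hp, List.isPrefixOf_iff_prefix.mpr (by simpa using hj)⟩)
          | succ j => exact hall p hp ⟨j, by simpa using hj⟩
        · rintro hall p hp ⟨j, hj⟩
          exact hall p hp ⟨j + 1, by simpa using hj⟩

theorem pvSkipPatternsB_ne_nil : ∀ p ∈ pvSkipPatternsB, p ≠ [] := by decide

-- ===== VERDICT (by name: the statement is the Claim_ definition above) =====
theorem is_important_file_spec : Claim_equal_is_important_file := by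
  intro fp _
  unfold Spec_is_important_file is_important_file is_important_file_alt
  rw [Bool.eq_iff_iff, pvALoop_eq_true_iff,
      pvBScan_eq_true_iff _ pvSkipPatternsB_ne_nil]
  have key : ∀ p : String,
      (¬ p.toList <:+: (PySem.Str.lower fp).toList) ↔
      ¬ ∃ j, p.toList <+: (PySem.Chars.lower fp.toList).drop j := by
    intro p
    rw [PySem.Str.toList_lower]
    constructor
    · intro hni hex
      exact hni ((PySem.Chars.isIn_iff_infix _ _).mp
        ((PySem.Chars.exists_prefix_drop_iff_isIn _ _).mp hex))
    · intro hnex hinf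
      exact hnex ((PySem.Chars.exists_prefix_drop_iff_isIn _ _).mpr
        ((PySem.Chars.isIn_iff_infix _ _).mpr hinf))
  constructor
  · intro hall q hq
    obtain ⟨p, hp, rfl⟩ := List.mem_map.mp hq
    exact (key p).mp (hall p hp)
  · intro hall p hp
    exact (key p).mpr (hall p.toList (List.mem_map_of_mem hp))
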